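-- pv_equiv track=rewrite | github.com/romeorizzi/TALight | example_problems/tutorial/cypher_game/services/cypher_game_lib.py | find_winning_moves_cypher_game_nim
-- ===== SOURCE A (Python) =====
-- from itertools import count, filterfalse
--
-- def find_all_moves(n, rmv_dup=False):
--     t=n
--     moves=[]
--     while t>0:
--         sub=t%10
--         if sub!=0:
--             moves.append(n-sub)
--         t=t//10
--     if rmv_dup:
--         moves=list(dict.fromkeys(moves))
--     return moves
--
-- def find_winning_moves_nim(n, nim=0, rmv_dup=False):
--     t=n
--     moves=[]
--     while t>0:
--         sub=t%10
--         if sub!=0 and grundy_sum(grundy_val(n-sub),nim)==0: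
--             moves.append(n-sub)
--         t=t//10
--     if rmv_dup:
--         moves=list(dict.fromkeys(moves))
--     return moves
--
-- def find_winning_moves_cypher_game_nim(n,nim=0,rmv_dup=False):
--     win_moves = find_winning_moves_nim(n,nim,rmv_dup)
--     win_moves_with_nim={(None,None)}
--     for move in win_moves:
--         move_t=move,+nim
--         win_moves_with_nim.add(move_t)
--     win_moves_with_nim.discard((None,None))
--     win_moves_with_nim.update(winning_moves_nim(n, nim))
--     return win_moves_with_nim
--
-- def winning_moves_nim(n, nim):
--     cypher_game_grundy_value = grundy_val(n)
--     win_moves={(None,None)}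
--     for i in range(1, nim+1):
--         if grundy_sum(cypher_game_grundy_value, nim-i)==0:
--             win_moves.add((n,nim-i))
--     win_moves.discard((None,None))
--     return win_moves
--
-- def grundy_val(n):
--     if n%10==0:
--         return 0
--     t=n
--     cyphers=[]
--     while t>0:
--         sub=t%10
--         if sub!=0:
--             cyphers.append(sub)
--         t=t//10
--     if len(set(cyphers))==1 or (n>0 and n<10) or (len(set(cyphers))==2 and 0 in set(cyphers)):
--         return 1
--     val1=[0,1,1,1,1,1,1,1,1,1]
--     val2=[]
--     for num in range(10,n+1,10):
--         for i in range(10):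
--             actual_num=num+i
--             moves=find_all_moves(actual_num,True)
--             values=[]
--             for move in moves:
--                 cypher2=actual_num%10
--                 if move<actual_num-cypher2:
--                     values.append(val1[move%10])
--                 else:
--                     values.append(val2[move%10])
--             val2.append(min_value(values))
--             if actual_num==n:
--                 return val2[n%10]
--         val1=val2
--         val2=[]
--
-- def min_value(list):
--     if 0 not in list:
--         return 0
--     return next(filterfalse(set(list).__contains__, count(1)))
--
-- def grundy_sum(val1:int, val2:int):
--     return val1 ^ val2
-- ===== SOURCE B (Python) =====
-- # B: build the Grundy DP table at most once (and only when some queried position actually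
-- # needs the DP), answer every query by table lookup, and emit the nim-pile reply (n, g(n))
-- # directly when g(n) < nim instead of scanning i = 1..nim.
--
-- def _digits(m):
--     """Nonzero decimal digits of m, least significant first."""
--     ds = []
--     t = m
--     while t > 0:
--         d = t % 10
--         if d:
--             ds.append(d)
--         t //= 10
--     return ds
--
-- def _mex(vals):
--     s = set(vals)
--     k = 0
--     while k in s:
--         k += 1
--     return k
--
-- def _table(n):
--     """G[m] = DP grundy value for m = 0..n (at least 0..9), one flat pass."""
--     G = [0, 1, 1, 1, 1, 1, 1, 1, 1, 1]
--     for m in range(10, n + 1):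
--         G.append(_mex([G[m - d] for d in _digits(m)]))
--     return G
--
-- def _special(m):
--     """Grundy value known without the DP table."""
--     return m % 10 == 0 or (0 < m < 10) or len(set(_digits(m))) == 1
--
-- def _grundy(m, G):
--     if m % 10 == 0:
--         return 0
--     if len(set(_digits(m))) == 1 or (0 < m < 10):
--         return 1
--     return G[m]
--
-- def find_winning_moves_cypher_game_nim(n, nim=0, rmv_dup=False):
--     queries = [n - d for d in _digits(n)]
--     if nim >= 1:
--         queries.append(n)
--     need = [m for m in queries if not _special(m)]
--     G = _table(max(need)) if need else []
--     out = []
--     for d in _digits(n):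
--         m = n - d
--         if _grundy(m, G) == nim and (m, nim) not in out:
--             out.append((m, nim))
--     if nim >= 1:
--         g = _grundy(n, G)
--         if g < nim:
--             out.append((n, g))
--     return set(out)
-- ===== Notes on version B (the rewrite author's own statement) =====
-- stated objective: faster
-- what changed: B builds the whole Grundy table once with a single flat DP pass (G[m] = mex of G[m-d] over the nonzero digits d) and answers every per-move query by table lookup, instead of A's re-running the blockwise val1/val2 DP from scratch inside every grundy_val call; B also emits the nim-pile reply (n, g(n)) directly when g(n) < nim instead of scanning i = 1..nim.
import Mathlib
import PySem

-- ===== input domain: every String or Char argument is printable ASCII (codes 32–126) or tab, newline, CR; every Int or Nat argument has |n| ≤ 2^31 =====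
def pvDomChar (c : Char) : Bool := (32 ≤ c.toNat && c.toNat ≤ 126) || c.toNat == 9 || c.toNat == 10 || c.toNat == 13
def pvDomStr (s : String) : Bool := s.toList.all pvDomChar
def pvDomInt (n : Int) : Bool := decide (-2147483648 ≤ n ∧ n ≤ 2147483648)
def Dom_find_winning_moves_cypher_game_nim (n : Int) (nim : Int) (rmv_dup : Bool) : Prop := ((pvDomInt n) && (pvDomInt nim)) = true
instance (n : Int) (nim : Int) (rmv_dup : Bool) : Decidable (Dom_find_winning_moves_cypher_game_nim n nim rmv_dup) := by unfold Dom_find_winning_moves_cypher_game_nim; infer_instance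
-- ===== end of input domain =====

-- ===== PORT A =====
-- A one-line summary: B replaces A's per-query Grundy recomputation by one flat DP table built once,
-- and the i = 1..nim scan by directly emitting (n, g(n)) when g(n) < nim (objective: faster).
-- Port of A: literal transliteration. Python `while t > 0: … t //= 10` loops become recursion on
-- t.toNat (decreasing by pvDiv10_lt); Python's unbounded mex scan gets fuel l.length + 1, whose
-- exhaustion is unreachable (pigeonhole: the first missing value is at most l.length + 1).

lemma pvDiv10_lt (t : Int) (h : 0 < t) : (PySem.Int.floordiv t 10).toNat < t.toNat := by
  rw [PySem.Int.floordiv_eq_ediv_of_pos (by norm_num : (0:Int) < 10)]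
  omega

def grundy_sum (val1 val2 : Int) : Int := PySem.Int.bxor val1 val2

def faLoop (n t : Int) (moves : List Int) : List Int :=
  if h : 0 < t then
    let sub := PySem.Int.mod t 10
    faLoop n (PySem.Int.floordiv t 10) (if sub ≠ 0 then moves ++ [n - sub] else moves)
  else moves
termination_by t.toNat
decreasing_by exact pvDiv10_lt t h

def find_all_moves (n : Int) (rmv_dup : Bool) : List Int :=
  let moves := faLoop n n []
  if rmv_dup then PySem.List.dedup moves else moves

-- the digit-collecting while-loop of A's grundy_val (`cyphers`) is verbatim the same loop as
-- Source B's `_digits`; it is ported once, here, and shared by both ports.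
def bDigitsLoop (t : Int) (ds : List Int) : List Int :=
  if h : 0 < t then
    let d := PySem.Int.mod t 10
    bDigitsLoop (PySem.Int.floordiv t 10) (if d ≠ 0 then ds ++ [d] else ds)
  else ds
termination_by t.toNat
decreasing_by exact pvDiv10_lt t h

-- next(filterfalse(set(list).__contains__, count(1))): scan k = 1, 2, … for the first k not in l
def mvScan (l : List Int) (k : Int) : Nat → Int
  | 0 => k
  | fuel + 1 => if k ∈ l then mvScan l (k + 1) fuel else k

def min_value (l : List Int) : Int :=
  if (0 : Int) ∈ l then mvScan l 1 (l.length + 1) else 0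

def gvInner (n num : Int) (val1 val2 : List Int) (i : Nat) : Int ⊕ List Int :=
  if _h : i < 10 then
    let actual_num := num + (i : Int)
    let moves := find_all_moves actual_num true
    let values := moves.foldl (fun acc mv =>
      let cypher2 := PySem.Int.mod actual_num 10
      acc ++ [if mv < actual_num - cypher2 then PySem.List.pyGetD val1 (PySem.Int.mod mv 10) 0
              else PySem.List.pyGetD val2 (PySem.Int.mod mv 10) 0]) []
    let val2' := val2 ++ [min_value values]
    if actual_num = n then Sum.inl (PySem.List.pyGetD val2' (PySem.Int.mod n 10) 0)
    else gvInner n num val1 val2' (i + 1)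
  else Sum.inr val2
termination_by 10 - i

def gvOuter (n num : Int) (val1 : List Int) : Option Int :=
  if h : num ≤ n then
    match gvInner n num val1 [] 0 with
    | Sum.inl r => some r
    | Sum.inr val2 => gvOuter n (num + 10) val2
  else none   -- the Python for-loop ends without returning: None
termination_by (n + 1 - num).toNat

def grundy_val (n : Int) : Option Int :=
  if PySem.Int.mod n 10 = 0 then some 0
  else
    let cyphers := bDigitsLoop n []
    let s := PySem.Set.ofList cyphers
    if PySem.Set.len s = 1 ∨ (0 < n ∧ n < 10) ∨ (PySem.Set.len s = 2 ∧ (0:Int) ∈ s) then some 1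
    else gvOuter n 10 [0,1,1,1,1,1,1,1,1,1]

-- grundy_val (n - sub) is always `some` when this loop runs (0 ≤ n - sub); a `none` would be a
-- Python TypeError, which cannot happen here.
def fwLoop (n nim t : Int) (moves : List Int) : List Int :=
  if h : 0 < t then
    let sub := PySem.Int.mod t 10
    fwLoop n nim (PySem.Int.floordiv t 10)
      (if sub ≠ 0 ∧ grundy_sum ((grundy_val (n - sub)).getD 0) nim = 0 then moves ++ [n - sub] else moves)
  else moves
termination_by t.toNat
decreasing_by exact pvDiv10_lt t h

def find_winning_moves_nim (n nim : Int) (rmv_dup : Bool) : List Int :=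
  let moves := fwLoop n nim n []
  if rmv_dup then PySem.List.dedup moves else moves

-- `grundy_val n = none` here would be a Python TypeError inside the loop body (None ^ int) whenever
-- the loop runs; exactly those inputs are excluded by Pre_.  The {(None,None)} sentinel is added and
-- discarded before any (int,int) pair is observed and never equals one: modeled as the empty set.
def winning_moves_nim (n nim : Int) : PySem.Set (Int × Int) :=
  let cypher_game_grundy_value := (grundy_val n).getD 0
  (PySem.List.pyRange 1 (nim + 1) 1).foldl
    (fun s i => if grundy_sum cypher_game_grundy_value (nim - i) = 0
                then PySem.Set.add s (n, nim - i) else s)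
    PySem.Set.empty

def find_winning_moves_cypher_game_nim (n : Int) (nim : Int) (rmv_dup : Bool) : List (Int × Int) :=
  let win_moves := find_winning_moves_nim n nim rmv_dup
  -- {(None,None)} sentinel modeled as the empty set (see winning_moves_nim)
  let s := win_moves.foldl (fun s move => PySem.Set.add s (move, nim))
             (PySem.Set.empty : PySem.Set (Int × Int))
  PySem.Set.update s (winning_moves_nim n nim)

-- ===== PORT B =====
-- Port of B (Source B): a flat Grundy table built at most once — and only when some queried
-- position needs the DP — with every query a lookup.  Python's list (O(1) index/append)
-- is ported as Array Int.

-- Source B's _digits loop is the same loop as A's cyphers loop, ported once as bDigitsLoop above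
def bDigits (m : Int) : List Int := bDigitsLoop m []

-- `while k in s: k += 1`; fuel vals.length + 1 is unreachable (the mex is at most vals.length)
def bMexLoop (s : PySem.Set Int) (k : Int) : Nat → Int
  | 0 => k
  | fuel + 1 => if PySem.Set.contains s k then bMexLoop s (k + 1) fuel else k

def bMex (vals : List Int) : Int :=
  bMexLoop (PySem.Set.ofList vals) 0 (vals.length + 1)

-- the indices m - d are ≥ 1 here, so `.toNat` is exact for Python's G[m - d]
def bTable (n : Int) : Array Int :=
  (PySem.List.pyRange 10 (n + 1) 1).foldl
    (fun G m => G.push (bMex ((bDigits m).map (fun d => G.getD (m - d).toNat 0))))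
    #[0,1,1,1,1,1,1,1,1,1]

def bSpecial (m : Int) : Bool :=
  decide (PySem.Int.mod m 10 = 0 ∨ (0 < m ∧ m < 10) ∨
          PySem.Set.len (PySem.Set.ofList (bDigits m)) = 1)

def bGrundy (m : Int) (G : Array Int) : Int :=
  if PySem.Int.mod m 10 = 0 then 0
  else
    let ds := PySem.Set.ofList (bDigits m)
    if PySem.Set.len ds = 1 ∨ (0 < m ∧ m < 10) then 1
    else G.getD m.toNat 0   -- Python's G[m]; every lookup reached on admitted inputs has 0 ≤ m

def find_winning_moves_cypher_game_nim_alt (n : Int) (nim : Int) (rmv_dup : Bool) : List (Int × Int) :=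
  let queries := (bDigits n).map (fun d => n - d)
  let queries := if 1 ≤ nim then queries ++ [n] else queries
  let need := queries.filter (fun m => !(bSpecial m))
  -- `max(need)` is PySem.List.max?; the `if need else []` guard makes the none case unreachable
  let G : Array Int :=
    if need ≠ [] then bTable ((PySem.List.max? need (fun x => x)).getD 0) else #[]
  let out := (bDigits n).foldl
    (fun out d =>
      let m := n - d
      if bGrundy m G = nim ∧ (m, nim) ∉ out then out ++ [(m, nim)] else out) []
  let out := if 1 ≤ nim then
      (let g := bGrundy n G
       if g < nim then out ++ [(n, g)] else out)
    else out
  PySem.Set.ofList out   -- `return set(out)`; out is already duplicate-free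

-- ===== PRECONDITION & SPEC =====
-- Pre_ excludes exactly the inputs on which A raises a TypeError: n < 0 with n % 10 ≠ 0 and
-- nim ≥ 1 make grundy_val fall off its loop returning None, which is then xor-ed with an int.
def Pre_find_winning_moves_cypher_game_nim (n : Int) (nim : Int) (rmv_dup : Bool) : Prop :=
  0 ≤ n ∨ nim ≤ 0 ∨ PySem.Int.mod n 10 = 0

instance (n : Int) (nim : Int) (rmv_dup : Bool) : Decidable (Pre_find_winning_moves_cypher_game_nim n nim rmv_dup) := by
  unfold Pre_find_winning_moves_cypher_game_nim; infer_instance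

def pvWitness_find_winning_moves_cypher_game_nim : Int × Int × Bool := (25, 2, false)

def Spec_find_winning_moves_cypher_game_nim (n : Int) (nim : Int) (rmv_dup : Bool) (out : List (Int × Int)) : Prop := out = find_winning_moves_cypher_game_nim_alt n nim rmv_dup
instance (n : Int) (nim : Int) (rmv_dup : Bool) (out : List (Int × Int)) : Decidable (Spec_find_winning_moves_cypher_game_nim n nim rmv_dup out) := by unfold Spec_find_winning_moves_cypher_game_nim; infer_instance

-- ===== CLAIM (what is proved, stated in full; the proofs are below) =====
def Claim_equal_find_winning_moves_cypher_game_nim : Prop := ∀ (n : Int) (nim : Int) (rmv_dup : Bool), Dom_find_winning_moves_cypher_game_nim n nim rmv_dup → Pre_find_winning_moves_cypher_game_nim n nim rmv_dup → Spec_find_winning_moves_cypher_game_nim n nim rmv_dup (find_winning_moves_cypher_game_nim n nim rmv_dup)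

-- ===== LEMMAS AND PROOFS =====

-- ---- digit-loop facts ----

lemma bDigitsLoop_stop {t : Int} (h : ¬ 0 < t) (ds : List Int) : bDigitsLoop t ds = ds := by
  rw [bDigitsLoop]; simp [h]

lemma bDigitsLoop_step {t : Int} (h : 0 < t) (ds : List Int) :
    bDigitsLoop t ds = bDigitsLoop (PySem.Int.floordiv t 10)
      (if PySem.Int.mod t 10 ≠ 0 then ds ++ [PySem.Int.mod t 10] else ds) := by
  conv_lhs => rw [bDigitsLoop]
  simp only [h, dif_pos]

lemma bDigitsLoop_acc_aux : ∀ (k : Nat) (t : Int), t.toNat ≤ k → ∀ ds, bDigitsLoop t ds = ds ++ bDigitsLoop t [] := by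
  intro k
  induction k with
  | zero =>
    intro t ht ds
    have h : ¬ 0 < t := by omega
    rw [bDigitsLoop_stop h, bDigitsLoop_stop h]; simp
  | succ k ih =>
    intro t ht ds
    by_cases h : 0 < t
    · have hlt := pvDiv10_lt t h
      rw [bDigitsLoop_step h, bDigitsLoop_step h ([]),
          ih (PySem.Int.floordiv t 10) (by omega)
            (if PySem.Int.mod t 10 ≠ 0 then ds ++ [PySem.Int.mod t 10] else ds),
          ih (PySem.Int.floordiv t 10) (by omega)
            (if PySem.Int.mod t 10 ≠ 0 then [] ++ [PySem.Int.mod t 10] else [])]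
      by_cases hd : (10:Int) ∣ t <;> simp [hd]
    · rw [bDigitsLoop_stop h, bDigitsLoop_stop h]; simp

lemma bDigitsLoop_acc (t : Int) (ds : List Int) : bDigitsLoop t ds = ds ++ bDigitsLoop t [] :=
  bDigitsLoop_acc_aux t.toNat t le_rfl ds

lemma faLoop_eq_aux : ∀ (k : Nat) (t : Int), t.toNat ≤ k → ∀ (n : Int) (acc : List Int),
    faLoop n t acc = acc ++ (bDigitsLoop t []).map (fun d => n - d) := by
  intro k
  induction k with
  | zero =>
    intro t ht n acc
    have h : ¬ 0 < t := by omega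
    rw [faLoop, bDigitsLoop_stop h]
    simp [h]
  | succ k ih =>
    intro t ht n acc
    by_cases h : 0 < t
    · have hlt := pvDiv10_lt t h
      conv_lhs => rw [faLoop]
      simp only [h, dif_pos]
      rw [ih _ (by omega), bDigitsLoop_step h ([]),
          bDigitsLoop_acc (PySem.Int.floordiv t 10)
            (if PySem.Int.mod t 10 ≠ 0 then [] ++ [PySem.Int.mod t 10] else [])]
      by_cases hd : (10:Int) ∣ t <;> simp [hd]
    · rw [faLoop, bDigitsLoop_stop h]
      simp [h]

lemma faLoop_eq (n t : Int) (acc : List Int) :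
    faLoop n t acc = acc ++ (bDigitsLoop t []).map (fun d => n - d) :=
  faLoop_eq_aux t.toNat t le_rfl n acc

lemma fwLoop_eq_aux : ∀ (k : Nat) (t : Int), t.toNat ≤ k → ∀ (n nim : Int) (acc : List Int),
    fwLoop n nim t acc = acc ++
      ((bDigitsLoop t []).filter
        (fun d => grundy_sum ((grundy_val (n - d)).getD 0) nim = 0)).map (fun d => n - d) := by
  intro k
  induction k with
  | zero =>
    intro t ht n nim acc
    have h : ¬ 0 < t := by omega
    rw [fwLoop, bDigitsLoop_stop h]
    simp [h]
  | succ k ih =>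
    intro t ht n nim acc
    by_cases h : 0 < t
    · have hlt := pvDiv10_lt t h
      conv_lhs => rw [fwLoop]
      simp only [h, dif_pos]
      rw [ih _ (by omega), bDigitsLoop_step h ([]),
          bDigitsLoop_acc (PySem.Int.floordiv t 10)
            (if PySem.Int.mod t 10 ≠ 0 then [] ++ [PySem.Int.mod t 10] else [])]
      by_cases hd : (10:Int) ∣ t
      · simp [hd]
      · by_cases hg : grundy_sum ((grundy_val (n - t % 10)).getD 0) nim = 0 <;>
          simp [hd, hg]
    · rw [fwLoop, bDigitsLoop_stop h]
      simp [h]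

lemma fwLoop_eq (n nim t : Int) (acc : List Int) :
    fwLoop n nim t acc = acc ++
      ((bDigitsLoop t []).filter
        (fun d => grundy_sum ((grundy_val (n - d)).getD 0) nim = 0)).map (fun d => n - d) :=
  fwLoop_eq_aux t.toNat t le_rfl n nim acc

lemma bDigits_bounds_aux : ∀ (k : Nat) (t : Int), t.toNat ≤ k →
    ∀ d ∈ bDigitsLoop t [], 1 ≤ d ∧ d ≤ 9 ∧ d ≤ t := by
  intro k
  induction k with
  | zero =>
    intro t ht d hd
    have h : ¬ 0 < t := by omega
    rw [bDigitsLoop_stop h] at hd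
    simp at hd
  | succ k ih =>
    intro t ht d hd
    by_cases h : 0 < t
    · have hlt := pvDiv10_lt t h
      have h10 : (0:Int) < 10 := by norm_num
      have hm : PySem.Int.mod t 10 = t % 10 := PySem.Int.mod_eq_emod_of_pos h10
      have hq : PySem.Int.floordiv t 10 = t / 10 := PySem.Int.floordiv_eq_ediv_of_pos h10
      rw [bDigitsLoop_step h,
          bDigitsLoop_acc (PySem.Int.floordiv t 10)
            (if PySem.Int.mod t 10 ≠ 0 then [] ++ [PySem.Int.mod t 10] else [])] at hd
      rcases List.mem_append.mp hd with hd1 | hd2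
      · simp at hd1
        omega
      · have := ih _ (by omega) d hd2
        rw [hq] at this
        omega
    · rw [bDigitsLoop_stop h] at hd
      simp at hd

lemma bDigits_bounds (t : Int) : ∀ d ∈ bDigitsLoop t [], 1 ≤ d ∧ d ≤ 9 ∧ d ≤ t :=
  bDigits_bounds_aux t.toNat t le_rfl

-- ---- mex facts ----

def mexSpec (l : List Int) (v : Int) : Prop :=
  0 ≤ v ∧ v ∉ l ∧ ∀ j : Int, 0 ≤ j → j < v → j ∈ l

lemma exists_gap (l : List Int) (k : Int) (f : Nat) (hf : l.length < f) :
    ∃ m : Int, k ≤ m ∧ m < k + (f : Int) ∧ m ∉ l := by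
  by_contra hcon
  push_neg at hcon
  have hsub : PySem.List.pyRange k (k + (f:Int)) 1 ⊆ l := by
    intro x hx
    have hm := (PySem.List.mem_pyRange_one).mp hx
    exact hcon x hm.1 hm.2
  have hnd : (PySem.List.pyRange k (k + (f:Int)) 1).Nodup := PySem.List.nodup_pyRange_one k (k + (f:Int))
  have hlen : (PySem.List.pyRange k (k + (f:Int)) 1).length = f := by
    rw [PySem.List.length_pyRange_one]; omega
  have := (hnd.subperm hsub).length_le
  omega

lemma mvScan_spec (l : List Int) : ∀ (fuel : Nat) (k : Int), 0 ≤ k →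
    (∀ j : Int, 0 ≤ j → j < k → j ∈ l) →
    (∃ m : Int, k ≤ m ∧ m < k + (fuel : Int) ∧ m ∉ l) →
    mexSpec l (mvScan l k fuel) := by
  intro fuel
  induction fuel with
  | zero =>
    intro k hk hbelow hex
    obtain ⟨m, h1, h2, _⟩ := hex
    simp only [Nat.cast_zero, add_zero] at h2
    omega
  | succ f ih =>
    intro k hk hbelow hex
    rw [mvScan]
    by_cases hkl : k ∈ l
    · simp only [hkl, if_pos]
      apply ih (k + 1) (by omega)
      · intro j hj hjk
        by_cases hjk' : j < k
        · exact hbelow j hj hjk'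
        · have hj' : j = k := by omega
          rw [hj']; exact hkl
      · obtain ⟨m, h1, h2, h3⟩ := hex
        have hmk : m ≠ k := by rintro rfl; exact h3 hkl
        refine ⟨m, by omega, by push_cast at h2 ⊢; omega, h3⟩
    · simp only [hkl, if_neg, if_false]
      exact ⟨hk, hkl, hbelow⟩

lemma bMexLoop_spec (l : List Int) : ∀ (fuel : Nat) (k : Int), 0 ≤ k →
    (∀ j : Int, 0 ≤ j → j < k → j ∈ l) →
    (∃ m : Int, k ≤ m ∧ m < k + (fuel : Int) ∧ m ∉ l) →
    mexSpec l (bMexLoop (PySem.Set.ofList l) k fuel) := by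
  intro fuel
  induction fuel with
  | zero =>
    intro k hk hbelow hex
    obtain ⟨m, h1, h2, _⟩ := hex
    simp only [Nat.cast_zero, add_zero] at h2
    omega
  | succ f ih =>
    intro k hk hbelow hex
    rw [bMexLoop]
    have hc : PySem.Set.contains (PySem.Set.ofList l) k = true ↔ k ∈ l := by
      rw [PySem.Set.contains_iff, PySem.Set.mem_ofList]
    by_cases hkl : k ∈ l
    · rw [if_pos (hc.mpr hkl)]
      apply ih (k + 1) (by omega)
      · intro j hj hjk
        by_cases hjk' : j < k
        · exact hbelow j hj hjk'
        · have hj' : j = k := by omega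
          rw [hj']; exact hkl
      · obtain ⟨m, h1, h2, h3⟩ := hex
        have hmk : m ≠ k := by rintro rfl; exact h3 hkl
        refine ⟨m, by omega, by push_cast at h2 ⊢; omega, h3⟩
    · rw [if_neg (fun hcc => hkl (hc.mp hcc))]
      exact ⟨hk, hkl, hbelow⟩

lemma min_value_spec (l : List Int) : mexSpec l (min_value l) := by
  unfold min_value
  by_cases h0 : (0:Int) ∈ l
  · rw [if_pos h0]
    apply mvScan_spec l (l.length + 1) 1 (by omega)
    · intro j hj hjk
      have hj' : j = 0 := by omega
      rw [hj']; exact h0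
    · obtain ⟨m, h1, h2, h3⟩ := exists_gap l 1 (l.length + 1) (by omega)
      exact ⟨m, h1, h2, h3⟩
  · rw [if_neg h0]
    exact ⟨le_rfl, h0, by intro j hj hjv; omega⟩

lemma bMex_spec (l : List Int) : mexSpec l (bMex l) := by
  unfold bMex
  apply bMexLoop_spec l (l.length + 1) 0 le_rfl
  · intro j hj hjk; omega
  · obtain ⟨m, h1, h2, h3⟩ := exists_gap l 0 (l.length + 1) (by omega)
    exact ⟨m, h1, h2, h3⟩

lemma mexSpec_unique {l l' : List Int} {v w : Int}
    (hmem : ∀ x : Int, x ∈ l ↔ x ∈ l')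
    (hv : mexSpec l v) (hw : mexSpec l' w) : v = w := by
  rcases lt_trichotomy v w with h | h | h
  · exact absurd ((hmem v).mpr (hw.2.2 v hv.1 h)) hv.2.1
  · exact h
  · exact absurd ((hmem w).mp (hv.2.2 w hw.1 h)) hw.2.1

-- ---- xor fact ----

lemma bxor_eq_zero_iff (a b : Int) : PySem.Int.bxor a b = 0 ↔ a = b := by
  unfold PySem.Int.bxor
  by_cases ha : 0 ≤ a <;> by_cases hb : 0 ≤ b <;> simp only [ha, hb, if_pos, if_neg, if_true, if_false]
  · constructor
    · intro h
      have h2 : a.toNat ^^^ b.toNat = 0 := by exact_mod_cast h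
      have h3 := Nat.xor_eq_zero_iff.mp h2
      omega
    · rintro rfl; simp
  · have hx : (0:Int) ≤ ((a.toNat ^^^ (-b - 1).toNat : Nat) : Int) := by positivity
    constructor <;> intro h <;> omega
  · have hx : (0:Int) ≤ (((-a - 1).toNat ^^^ b.toNat : Nat) : Int) := by positivity
    constructor <;> intro h <;> omega
  · constructor
    · intro h
      have h2 : (-a - 1).toNat ^^^ (-b - 1).toNat = 0 := by exact_mod_cast h
      have h3 := Nat.xor_eq_zero_iff.mp h2
      omega
    · rintro rfl; simp

-- ---- table facts ----

def bTableL (n : Int) : List Int :=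
  (PySem.List.pyRange 10 (n + 1) 1).foldl
    (fun G m => G ++ [bMex ((bDigits m).map (fun d => PySem.List.pyGetD G (m - d) 0))])
    [0,1,1,1,1,1,1,1,1,1]

lemma bTable_low {n : Int} (h : n ≤ 9) : bTableL n = [0,1,1,1,1,1,1,1,1,1] := by
  unfold bTableL
  rw [PySem.List.pyRange_one_eq_nil (by omega)]
  rfl

lemma bTable_succ {n : Int} (h : 10 ≤ n) :
    bTableL n = bTableL (n - 1) ++
      [bMex ((bDigits n).map (fun d => PySem.List.pyGetD (bTableL (n - 1)) (n - d) 0))] := by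
  have h2 : n - 1 + 1 = n := by ring
  unfold bTableL
  rw [h2, PySem.List.pyRange_one_succ_right (by omega : (10:Int) ≤ n), List.foldl_append]
  simp

lemma bTable_length_aux : ∀ (k : Nat) (n : Int), n.toNat ≤ k →
    (bTableL n).length = 10 + (n - 9).toNat := by
  intro k
  induction k with
  | zero =>
    intro n hn
    rw [bTable_low (by omega)]
    simp; omega
  | succ k ih =>
    intro n hn
    by_cases h : n ≤ 9
    · rw [bTable_low h]; simp; omega
    · rw [bTable_succ (by omega), List.length_append, ih (n - 1) (by omega)]
      simp; omega

lemma bTable_length (n : Int) : (bTableL n).length = 10 + (n - 9).toNat :=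
  bTable_length_aux n.toNat n le_rfl

def Gv (m : Int) : Int := PySem.List.pyGetD (bTableL m) m 0

lemma pyGetD_append_left {l l' : List Int} {i : Int} (h0 : 0 ≤ i) (h : i.toNat < l.length) :
    PySem.List.pyGetD (l ++ l') i 0 = PySem.List.pyGetD l i 0 := by
  rw [PySem.List.pyGetD_eq_getElem (l ++ l') 0 h0 (by simp; omega),
      PySem.List.pyGetD_eq_getElem l 0 h0 (by omega)]
  exact List.getElem_append_left h

lemma bTable_get_aux : ∀ (k : Nat) (n : Int), n.toNat ≤ k → ∀ m : Int, 0 ≤ m → m ≤ n →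
    PySem.List.pyGetD (bTableL n) m 0 = Gv m := by
  intro k
  induction k with
  | zero =>
    intro n hn m h0 hmn
    have : m = n := by omega
    rw [this]; rfl
  | succ k ih =>
    intro n hn m h0 hmn
    by_cases heq : m = n
    · rw [heq]; rfl
    · by_cases h9 : n ≤ 9
      · unfold Gv
        rw [bTable_low h9, bTable_low (by omega : m ≤ 9)]
      · rw [bTable_succ (by omega)]
        rw [pyGetD_append_left h0 (by rw [bTable_length]; omega)]
        exact ih (n - 1) (by omega) m h0 (by omega)

lemma bTable_get {m n : Int} (h0 : 0 ≤ m) (hmn : m ≤ n) :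
    PySem.List.pyGetD (bTableL n) m 0 = Gv m :=
  bTable_get_aux n.toNat n le_rfl m h0 hmn

lemma pyGetD_append_self (l : List Int) (x : Int) (i : Int) (h : i = (l.length : Int)) :
    PySem.List.pyGetD (l ++ [x]) i 0 = x := by
  subst h
  unfold PySem.List.pyGetD
  rw [PySem.List.pyGet?_append_length l [] x]
  rfl

lemma Gv_recurrence {m : Int} (h : 10 ≤ m) :
    Gv m = bMex ((bDigits m).map (fun d => Gv (m - d))) := by
  unfold Gv
  rw [bTable_succ h]
  rw [pyGetD_append_self _ _ _ (by rw [bTable_length]; omega)]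
  congr 1
  apply List.map_congr_left
  intro d hd
  have hb := bDigits_bounds m d hd
  exact bTable_get (by omega) (by omega)

lemma bTable_mem_nonneg_aux : ∀ (k : Nat) (n : Int), n.toNat ≤ k →
    ∀ x ∈ bTableL n, 0 ≤ x := by
  intro k
  induction k with
  | zero =>
    intro n hn x hx
    rw [bTable_low (by omega)] at hx
    simp at hx
    rcases hx with h | h | h <;> omega
  | succ k ih =>
    intro n hn x hx
    by_cases h9 : n ≤ 9
    · rw [bTable_low h9] at hx
      simp at hx
      rcases hx with h | h | h <;> omega
    · rw [bTable_succ (by omega)] at hx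
      rcases List.mem_append.mp hx with h | h
      · exact ih (n - 1) (by omega) x h
      · simp at h
        rw [h]
        exact (bMex_spec _).1

lemma Gv_nonneg (m : Int) : 0 ≤ Gv m := by
  unfold Gv PySem.List.pyGetD
  cases hg : PySem.List.pyGet? (bTableL m) m with
  | none => simp
  | some x =>
    simp only [Option.getD_some]
    exact bTable_mem_nonneg_aux m.toNat m le_rfl x (PySem.List.mem_of_pyGet?_eq_some _ hg)

-- ---- A's blockwise DP computes Gv ----

def S (a : Int) : Nat → List Int
  | 0 => []
  | len + 1 => S a len ++ [Gv (a + (len : Int))]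

lemma S_succ (a : Int) (len : Nat) : S a (len + 1) = S a len ++ [Gv (a + (len : Int))] := rfl

lemma length_S (a : Int) (len : Nat) : (S a len).length = len := by
  induction len with
  | zero => rfl
  | succ k ih => simp [S, ih]

lemma S_pyGetD (a : Int) (len : Nat) (i : Int) (h0 : 0 ≤ i) (hlt : i < (len : Int)) :
    PySem.List.pyGetD (S a len) i 0 = Gv (a + i) := by
  induction len with
  | zero => omega
  | succ k ih =>
    rw [S_succ]
    by_cases hk : i < (k : Int)
    · rw [pyGetD_append_left h0 (by rw [length_S]; omega)]
      exact ih hk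
    · have hik : i = (k : Int) := by omega
      rw [hik, pyGetD_append_self _ _ _ (by rw [length_S])]

lemma seed_eq : S 0 10 = [0,1,1,1,1,1,1,1,1,1] := by
  decide

lemma entry_eq {num : Int} {i : Nat} (hnum : 10 ≤ num) (hdvd : (10:Int) ∣ num) (hi : i < 10) :
    min_value ((find_all_moves (num + (i:Int)) true).foldl (fun acc mv =>
      acc ++ [if mv < (num + (i:Int)) - PySem.Int.mod (num + (i:Int)) 10
              then PySem.List.pyGetD (S (num - 10) 10) (PySem.Int.mod mv 10) 0
              else PySem.List.pyGetD (S num i) (PySem.Int.mod mv 10) 0]) [])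
    = Gv (num + (i:Int)) := by
  obtain ⟨K, hK⟩ := hdvd
  have han10 : 10 ≤ num + (i:Int) := by omega
  rw [PySem.List.foldl_append_singleton_eq_map]
  have hmoves : find_all_moves (num + (i:Int)) true =
      PySem.List.dedup ((bDigitsLoop (num + (i:Int)) []).map (fun d => num + (i:Int) - d)) := by
    unfold find_all_moves
    rw [faLoop_eq]
    simp
  rw [hmoves]
  have hmodan : PySem.Int.mod (num + (i:Int)) 10 = (i:Int) := by
    rw [PySem.Int.mod_eq_emod_of_pos (by norm_num)]
    omega
  have hlook : ∀ mv ∈ PySem.List.dedup ((bDigitsLoop (num + (i:Int)) []).map (fun d => num + (i:Int) - d)),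
      (if mv < (num + (i:Int)) - PySem.Int.mod (num + (i:Int)) 10
       then PySem.List.pyGetD (S (num - 10) 10) (PySem.Int.mod mv 10) 0
       else PySem.List.pyGetD (S num i) (PySem.Int.mod mv 10) 0) = Gv mv := by
    intro mv hmv
    rw [PySem.List.mem_dedup] at hmv
    obtain ⟨d, hd, rfl⟩ := List.mem_map.mp hmv
    have hb := bDigits_bounds (num + (i:Int)) d hd
    rw [hmodan]
    by_cases hcase : num + (i:Int) - d < num + (i:Int) - (i:Int)
    · rw [if_pos hcase]
      have hr : PySem.Int.mod (num + (i:Int) - d) 10 = (num + (i:Int) - d) - (num - 10) := by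
        rw [PySem.Int.mod_eq_emod_of_pos (by norm_num)]
        omega
      rw [hr, S_pyGetD _ _ _ (by omega) (by push_cast; omega)]
      congr 1
      omega
    · rw [if_neg hcase]
      have hr : PySem.Int.mod (num + (i:Int) - d) 10 = (num + (i:Int) - d) - num := by
        rw [PySem.Int.mod_eq_emod_of_pos (by norm_num)]
        omega
      rw [hr, S_pyGetD _ _ _ (by omega) (by push_cast; omega)]
      congr 1
      omega
  rw [Gv_recurrence han10]
  simp only [List.nil_append, bDigits]
  apply mexSpec_unique ?_ (min_value_spec _) (bMex_spec _)
  intro x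
  constructor
  · intro hx
    obtain ⟨mv, hmv, rfl⟩ := List.mem_map.mp hx
    rw [hlook mv hmv]
    rw [PySem.List.mem_dedup] at hmv
    obtain ⟨d, hd, rfl⟩ := List.mem_map.mp hmv
    exact List.mem_map.mpr ⟨d, hd, rfl⟩
  · intro hx
    obtain ⟨d, hd, rfl⟩ := List.mem_map.mp hx
    refine List.mem_map.mpr ⟨num + (i:Int) - d, ?_, ?_⟩
    · rw [PySem.List.mem_dedup]
      exact List.mem_map.mpr ⟨d, hd, rfl⟩
    · exact hlook _ ((PySem.List.mem_dedup _ _).mpr (List.mem_map.mpr ⟨d, hd, rfl⟩))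

lemma gvInner_eq_aux : ∀ (j : Nat) (n num : Int) (i : Nat), i + j = 10 → 10 ≤ num → (10:Int) ∣ num →
    num + (i:Int) ≤ n →
    gvInner n num (S (num - 10) 10) (S num i) i =
      if n < num + 10 then Sum.inl (Gv n) else Sum.inr (S num 10) := by
  intro j
  induction j with
  | zero =>
    intro n num i hij hnum hdvd hle
    have hi : i = 10 := by omega
    subst hi
    rw [gvInner, dif_neg (by omega : ¬ (10:Nat) < 10)]
    rw [if_neg (by push_cast at hle; omega : ¬ n < num + 10)]
  | succ j ih =>
    intro n num i hij hnum hdvd hle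
    have hi : i < 10 := by omega
    rw [gvInner, dif_pos hi]
    dsimp only
    by_cases han : num + (i:Int) = n
    · rw [if_pos han]
      rw [if_pos (by omega : n < num + 10)]
      have hmodn : PySem.Int.mod n 10 = (i:Int) := by
        obtain ⟨K, hK⟩ := hdvd
        rw [PySem.Int.mod_eq_emod_of_pos (by norm_num)]
        omega
      rw [pyGetD_append_self _ _ _ (by rw [hmodn, length_S])]
      rw [entry_eq hnum hdvd hi, han]
    · rw [if_neg han]
      rw [entry_eq hnum hdvd hi, ← S_succ]
      exact ih n num (i + 1) (by omega) hnum hdvd (by push_cast; push_cast at hle; omega)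

lemma gvOuter_eq_aux : ∀ (k : Nat) (num n : Int), (n - num).toNat ≤ k → 10 ≤ num → (10:Int) ∣ num →
    num ≤ n → gvOuter n num (S (num - 10) 10) = some (Gv n) := by
  intro k
  induction k with
  | zero =>
    intro num n hk hnum hdvd hle
    rw [gvOuter, dif_pos hle]
    rw [show ([] : List Int) = S num 0 from rfl,
        gvInner_eq_aux 10 n num 0 (by omega) hnum hdvd (by push_cast; omega)]
    rw [if_pos (by omega : n < num + 10)]
  | succ k ih =>
    intro num n hk hnum hdvd hle
    rw [gvOuter, dif_pos hle]
    rw [show ([] : List Int) = S num 0 from rfl,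
        gvInner_eq_aux 10 n num 0 (by omega) hnum hdvd (by push_cast; omega)]
    by_cases hlt : n < num + 10
    · rw [if_pos hlt]
    · rw [if_neg hlt]
      rw [show S num 10 = S ((num + 10) - 10) 10 by norm_num]
      exact ih (num + 10) n (by omega) (by omega) (dvd_add hdvd (dvd_refl 10)) (by omega)

lemma gvOuter_eq (n : Int) : ∀ (num : Int), 10 ≤ num → (10:Int) ∣ num → num ≤ n →
    gvOuter n num (S (num - 10) 10) = some (Gv n) :=
  fun num h1 h2 h3 => gvOuter_eq_aux (n - num).toNat num n le_rfl h1 h2 h3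

-- ---- grundy_val = bGrundy ----

lemma mod_zero_ten : PySem.Int.mod 0 10 = 0 := by decide

-- bridge: Array.getD at a nonnegative Int index = pyGetD on the underlying list
lemma arrGetD_eq (a : Array Int) (i : Int) (h0 : 0 ≤ i) :
    a.getD i.toNat 0 = PySem.List.pyGetD a.toList i 0 := by
  rw [show i = ((i.toNat : Nat) : Int) by omega, PySem.List.pyGetD_natCast,
      Array.getD_eq_getD_getElem?, List.getD_eq_getElem?_getD, Array.getElem?_toList]
  rw [show ((i.toNat : Int)).toNat = i.toNat by omega]

lemma bTable_toList_aux : ∀ (l : List Int), (∀ m ∈ l, 10 ≤ m) → ∀ (G : Array Int),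
    (l.foldl (fun G m => G.push (bMex ((bDigits m).map (fun d => G.getD (m - d).toNat 0)))) G).toList
      = l.foldl (fun G m => G ++ [bMex ((bDigits m).map (fun d => PySem.List.pyGetD G (m - d) 0))])
          G.toList := by
  intro l
  induction l with
  | nil => intro _ G; rfl
  | cons m t ih =>
    intro hmem G
    simp only [List.foldl_cons]
    have hx : (bDigits m).map (fun d => G.getD (m - d).toNat 0) =
        (bDigits m).map (fun d => PySem.List.pyGetD G.toList (m - d) 0) := by
      apply List.map_congr_left
      intro d hd
      have hb := bDigits_bounds m d hd
      have h10 := hmem m List.mem_cons_self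
      exact arrGetD_eq G (m - d) (by omega)
    rw [ih (fun x hx' => hmem x (List.mem_cons_of_mem m hx')), Array.toList_push, hx]

lemma bTable_toList (n : Int) : (bTable n).toList = bTableL n := by
  unfold bTable bTableL
  rw [bTable_toList_aux _ (fun m hm => (PySem.List.mem_pyRange_one.mp hm).1) _]

lemma bGrundy_special {m : Int} (G G' : Array Int)
    (h : PySem.Int.mod m 10 = 0 ∨ (0 < m ∧ m < 10) ∨
         PySem.Set.len (PySem.Set.ofList (bDigits m)) = 1) :
    bGrundy m G = bGrundy m G' := by
  unfold bGrundy
  by_cases h0 : PySem.Int.mod m 10 = 0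
  · rw [if_pos h0, if_pos h0]
  · rw [if_neg h0, if_neg h0]
    have hsp : PySem.Set.len (PySem.Set.ofList (bDigits m)) = 1 ∨ (0 < m ∧ m < 10) := by
      rcases h with h | h | h
      · exact absurd h h0
      · exact Or.inr h
      · exact Or.inl h
    rw [if_pos hsp, if_pos hsp]

lemma grundy_val_eq {m N : Int} (hmN : m ≤ N) (hm : 0 ≤ m ∨ PySem.Int.mod m 10 = 0) :
    grundy_val m = some (bGrundy m (bTable N)) := by
  simp only [grundy_val, bGrundy, bDigits]
  by_cases h0 : PySem.Int.mod m 10 = 0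
  · rw [if_pos h0, if_pos h0]
  · have h0m : 0 ≤ m := hm.resolve_right h0
    have hm1 : 1 ≤ m := by
      rcases eq_or_lt_of_le h0m with h | h
      · exact absurd (h ▸ mod_zero_ten) h0
      · omega
    rw [if_neg h0, if_neg h0]
    have hz : (0:Int) ∉ PySem.Set.ofList (bDigitsLoop m []) := by
      rw [PySem.Set.mem_ofList]
      intro hmem
      have := bDigits_bounds m 0 hmem
      omega
    by_cases hsp : PySem.Set.len (PySem.Set.ofList (bDigitsLoop m [])) = 1 ∨ (0 < m ∧ m < 10)
    · rw [if_pos hsp]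
      rcases hsp with h | h
      · rw [if_pos (Or.inl h)]
      · rw [if_pos (Or.inr (Or.inl h))]
    · have hsp' : ¬(PySem.Set.len (PySem.Set.ofList (bDigitsLoop m [])) = 1 ∨ (0 < m ∧ m < 10) ∨
          (PySem.Set.len (PySem.Set.ofList (bDigitsLoop m [])) = 2 ∧ (0:Int) ∈ PySem.Set.ofList (bDigitsLoop m []))) := by
        rintro (h | h | h)
        · exact hsp (Or.inl h)
        · exact hsp (Or.inr h)
        · exact hz h.2
      rw [if_neg hsp', if_neg hsp]
      rw [arrGetD_eq _ _ h0m, bTable_toList, bTable_get h0m hmN]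
      have hm10 : 10 ≤ m := by
        by_contra hlt
        exact hsp (Or.inr ⟨by omega, by omega⟩)
      have hseed : ([0,1,1,1,1,1,1,1,1,1] : List Int) = S (10 - 10) 10 := by
        rw [show ((10:Int) - 10) = 0 by ring, seed_eq]
      rw [hseed, gvOuter_eq m 10 le_rfl (by norm_num) hm10]

lemma bGrundy_nonneg (m : Int) (N : Int) (hmN : m ≤ N) (h0 : 0 ≤ m ∨ PySem.Int.mod m 10 = 0) :
    0 ≤ bGrundy m (bTable N) := by
  simp only [bGrundy, bDigits]
  by_cases hz : PySem.Int.mod m 10 = 0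
  · rw [if_pos hz]
  · rw [if_neg hz]
    by_cases hsp : PySem.Set.len (PySem.Set.ofList (bDigitsLoop m [])) = 1 ∨ (0 < m ∧ m < 10)
    · rw [if_pos hsp]; omega
    · rw [if_neg hsp, arrGetD_eq _ _ (h0.resolve_right hz), bTable_toList,
          bTable_get (h0.resolve_right hz) hmN]
      exact Gv_nonneg m

-- ---- set plumbing ----

lemma discard_map_pair (s : List Int) (x c : Int) :
    (PySem.Set.discard s x).map (fun mv => (mv, c)) =
      PySem.Set.discard (s.map (fun mv => (mv, c))) (x, c) := by
  rw [PySem.Set.discard.eq_1, PySem.Set.discard.eq_1, List.filter_map]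
  congr 1
  apply List.filter_congr
  intro a _
  by_cases hax : a = x
  · simp [hax]
  · simp [hax, Prod.ext_iff]

lemma ofList_map_pair (W : List Int) (c : Int) :
    (PySem.Set.ofList W).map (fun mv => (mv, c)) =
      PySem.Set.ofList (W.map (fun mv => (mv, c))) := by
  induction W with
  | nil => rfl
  | cons x t ih =>
    rw [List.map_cons, PySem.Set.ofList_cons, PySem.Set.ofList_cons, List.map_cons,
        discard_map_pair, ih]

lemma winning_moves_nim_eq (n nim : Int) :
    winning_moves_nim n nim =
      (if 0 ≤ (grundy_val n).getD 0 ∧ (grundy_val n).getD 0 < nim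
       then [(n, (grundy_val n).getD 0)] else []) := by
  unfold winning_moves_nim grundy_sum
  rw [PySem.List.foldl_ite_eq_foldl_filter
    (p := fun i => PySem.Int.bxor ((grundy_val n).getD 0) (nim - i) = 0)
    (f := fun s i => PySem.Set.add s (n, nim - i))]
  have hfe : (PySem.List.pyRange 1 (nim + 1) 1).filter
        (fun i => decide (PySem.Int.bxor ((grundy_val n).getD 0) (nim - i) = 0)) =
      (PySem.List.pyRange 1 (nim + 1) 1).filter (fun i => i == nim - (grundy_val n).getD 0) := by
    apply List.filter_congr
    intro i _
    by_cases hc : i = nim - (grundy_val n).getD 0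
    · subst hc
      have hx : nim - (nim - (grundy_val n).getD 0) = (grundy_val n).getD 0 := by ring
      simp [hx, PySem.Int.bxor_self]
    · have hnz : ¬ PySem.Int.bxor ((grundy_val n).getD 0) (nim - i) = 0 := fun h => by
        have := (bxor_eq_zero_iff ((grundy_val n).getD 0) (nim - i)).mp h
        omega
      simp [hc, hnz]
  rw [hfe, List.filter_beq]
  by_cases hin : nim - (grundy_val n).getD 0 ∈ PySem.List.pyRange 1 (nim + 1) 1
  · have hcnt : (PySem.List.pyRange 1 (nim + 1) 1).count (nim - (grundy_val n).getD 0) = 1 :=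
      List.count_eq_one_of_mem (PySem.List.nodup_pyRange_one 1 (nim + 1)) hin
    rw [hcnt]
    have hmem := PySem.List.mem_pyRange_one.mp hin
    rw [if_pos ⟨by omega, by omega⟩]
    simp [PySem.Set.empty, PySem.Set.add]
  · have hcnt : (PySem.List.pyRange 1 (nim + 1) 1).count (nim - (grundy_val n).getD 0) = 0 :=
      List.count_eq_zero_of_not_mem hin
    rw [hcnt]
    have hnot : ¬(0 ≤ (grundy_val n).getD 0 ∧ (grundy_val n).getD 0 < nim) := by
      intro hcon
      exact hin (PySem.List.mem_pyRange_one.mpr ⟨by omega, by omega⟩)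
    rw [if_neg hnot]
    rfl

-- ===== VERDICT (by name: the statement is the Claim_ definition above) =====
theorem find_winning_moves_cypher_game_nim_spec : Claim_equal_find_winning_moves_cypher_game_nim := by
  intro n nim rmv_dup hDom hPre
  unfold Spec_find_winning_moves_cypher_game_nim
  simp only [find_winning_moves_cypher_game_nim, find_winning_moves_cypher_game_nim_alt, bDigits]
  set qs : List Int := if 1 ≤ nim then (bDigitsLoop n []).map (fun d => n - d) ++ [n]
      else (bDigitsLoop n []).map (fun d => n - d) with hqs
  set G : Array Int := if qs.filter (fun m => !(bSpecial m)) ≠ [] then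
      bTable ((PySem.List.max? (qs.filter (fun m => !(bSpecial m))) (fun x => x)).getD 0)
    else #[] with hG
  -- every queried position: A's grundy_val agrees with B's lookup in G
  have hquery : ∀ m : Int, (0 ≤ m ∨ PySem.Int.mod m 10 = 0) → m ∈ qs →
      grundy_val m = some (bGrundy m G) := by
    intro m hm hmem
    by_cases hsp : bSpecial m = true
    · have hsp' : PySem.Int.mod m 10 = 0 ∨ (0 < m ∧ m < 10) ∨
          PySem.Set.len (PySem.Set.ofList (bDigits m)) = 1 := by
        simpa [bSpecial] using hsp
      rw [grundy_val_eq le_rfl hm]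
      exact congrArg some (bGrundy_special (bTable m) G hsp')
    · have hneed : m ∈ qs.filter (fun m => !(bSpecial m)) :=
        List.mem_filter.mpr ⟨hmem, by simp [hsp]⟩
      have hne : qs.filter (fun m => !(bSpecial m)) ≠ [] := by
        intro h
        rw [h] at hneed
        simp at hneed
      obtain ⟨N, hN⟩ : ∃ N, PySem.List.max? (qs.filter (fun m => !(bSpecial m))) (fun x => x) = some N := by
        cases hmax : PySem.List.max? (qs.filter (fun m => !(bSpecial m))) (fun x => x) with
        | none => exact absurd ((PySem.List.max?_eq_none_iff _ _).mp hmax) hne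
        | some N => exact ⟨N, rfl⟩
      have hmN : m ≤ N := PySem.List.max?_isMax hN m hneed
      rw [hG, if_pos hne, hN]
      exact grundy_val_eq hmN hm
  have hmemq : ∀ d ∈ bDigitsLoop n [], (n - d) ∈ qs := by
    intro d hd
    have hx : (n - d) ∈ (bDigitsLoop n []).map (fun d => n - d) := List.mem_map.mpr ⟨d, hd, rfl⟩
    rw [hqs]
    by_cases h1 : 1 ≤ nim
    · rw [if_pos h1]; exact List.mem_append_left _ hx
    · rw [if_neg h1]; exact hx
  -- A's winning-move list (fwLoop) as a filtered digit list
  have hW : fwLoop n nim n [] =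
      ((bDigitsLoop n []).filter
        (fun d => decide (grundy_sum ((grundy_val (n - d)).getD 0) nim = 0))).map (fun d => n - d) := by
    rw [fwLoop_eq]; simp
  -- the two filter conditions agree on the digits of n
  have hfilt : (bDigitsLoop n []).filter
        (fun d => decide (grundy_sum ((grundy_val (n - d)).getD 0) nim = 0)) =
      (bDigitsLoop n []).filter (fun d => decide (bGrundy (n - d) G = nim)) := by
    apply List.filter_congr
    intro d hd
    have hb := bDigits_bounds n d hd
    rw [hquery (n - d) (Or.inl (by omega)) (hmemq d hd)]
    simp only [Option.getD_some, grundy_sum]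
    exact decide_eq_decide.mpr (bxor_eq_zero_iff _ _)
  -- folding Set.add over a list of pairs builds Set.ofList of the mapped list
  have hfold : ∀ (L : List Int),
      L.foldl (fun s move => PySem.Set.add s (move, nim)) PySem.Set.empty =
        PySem.Set.ofList (L.map (fun mv => (mv, nim))) := by
    intro L
    rw [← PySem.Set.update_map_eq_foldl_add, PySem.Set.ofList_eq_foldl]
    rfl
  -- the A-side set of digit moves
  have hsetA : (find_winning_moves_nim n nim rmv_dup).foldl
        (fun s move => PySem.Set.add s (move, nim)) PySem.Set.empty =
      PySem.Set.ofList (((bDigitsLoop n []).filter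
        (fun d => decide (bGrundy (n - d) G = nim))).map (fun d => (n - d, nim))) := by
    have hmm : (((bDigitsLoop n []).filter
          (fun d => decide (bGrundy (n - d) G = nim))).map (fun d => n - d)).map
            (fun mv => (mv, nim)) =
        ((bDigitsLoop n []).filter
          (fun d => decide (bGrundy (n - d) G = nim))).map (fun d => (n - d, nim)) := by
      rw [List.map_map]
      rfl
    unfold find_winning_moves_nim
    rw [hW, hfilt]
    cases rmv_dup with
    | false =>
      simp only [Bool.false_eq_true, if_false]
      rw [hfold, hmm]
    | true =>
      simp only [if_true]
      rw [hfold, PySem.List.dedup_eq_ofList, ofList_map_pair, PySem.Set.ofList_ofList, hmm]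
  rw [hsetA]
  -- the B-side fold builds the same set
  have hbody : ∀ (out : PySem.Set (Int × Int)) (d : Int),
      (if bGrundy (n - d) G = nim ∧ (n - d, nim) ∉ out then out ++ [(n - d, nim)] else out)
      = if bGrundy (n - d) G = nim then PySem.Set.add out (n - d, nim) else out := by
    intro out d
    by_cases h1 : bGrundy (n - d) G = nim
    · by_cases h2 : (n - d, nim) ∈ out
      · simp [h1, h2]
      · simp [h1, h2]
    · simp [h1]
  have hout : (bDigitsLoop n []).foldl
        (fun out d => if bGrundy (n - d) G = nim ∧ (n - d, nim) ∉ out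
                      then out ++ [(n - d, nim)] else out) [] =
      PySem.Set.ofList (((bDigitsLoop n []).filter
        (fun d => decide (bGrundy (n - d) G = nim))).map (fun d => (n - d, nim))) := by
    rw [PySem.List.foldl_congr_mem (bDigitsLoop n []) _
          (fun out d => if bGrundy (n - d) G = nim then PySem.Set.add out (n - d, nim) else out)
          [] (fun acc x _ => hbody acc x),
        PySem.List.foldl_ite_eq_foldl_filter (fun d => bGrundy (n - d) G = nim)
          (fun out d => PySem.Set.add out (n - d, nim)),
        ← PySem.Set.update_map_eq_foldl_add, PySem.Set.ofList_eq_foldl]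
    rfl
  rw [hout]
  rw [winning_moves_nim_eq]
  by_cases hnim : 1 ≤ nim
  · have hpre' : 0 ≤ n ∨ PySem.Int.mod n 10 = 0 := by
      rcases hPre with h | h | h
      · exact Or.inl h
      · omega
      · exact Or.inr h
    have hnq : n ∈ qs := by
      rw [hqs, if_pos hnim]
      exact List.mem_append_right _ List.mem_cons_self
    rw [hquery n hpre' hnq]
    simp only [Option.getD_some]
    have hg0 : 0 ≤ bGrundy n G := by
      have h1 := hquery n hpre' hnq
      have h2 := grundy_val_eq (le_refl n) hpre'
      have h3 : bGrundy n G = bGrundy n (bTable n) := by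
        rw [h1] at h2
        exact Option.some_injective _ h2
      rw [h3]
      exact bGrundy_nonneg n n le_rfl hpre'
    by_cases hlt : bGrundy n G < nim
    · rw [if_pos ⟨hg0, hlt⟩, if_pos hnim, if_pos hlt]
      rw [PySem.Set.update_cons, PySem.Set.update_nil, PySem.Set.ofList_append_singleton,
          PySem.Set.ofList_ofList]
    · rw [if_neg (fun hc => hlt hc.2), if_pos hnim, if_neg hlt]
      rw [PySem.Set.update_nil, PySem.Set.ofList_ofList]
  · rw [if_neg (by rintro ⟨h1, h2⟩; omega :
        ¬(0 ≤ (grundy_val n).getD 0 ∧ (grundy_val n).getD 0 < nim))]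
    rw [PySem.Set.update_nil, if_neg hnim, PySem.Set.ofList_ofList]
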